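-- pv_equiv track=rewrite | github.com/sultonmuhajir/cw-7k | Python/7py 2/special_number.py | special_number
-- ===== SOURCE A (Python) =====
-- def special_number(number):
--    x = '012345'
--    num = str(number)
--    count = 0
--    for i in range(len(num)):
--       for j in range(len(x)):
--          if num[i] == x[j]:
--             count+=1
--    return "Special!!" if count==len(num) else "NOT!!"
-- ===== SOURCE B (Python) =====
-- def special_number(number):
--     return "Special!!" if set(str(number)) <= set('012345') else "NOT!!"
-- ===== Notes on version B (the rewrite author's own statement) =====
-- stated objective: idiomatic
-- what changed: Replaces A's O(n*6) nested index loops that count per-character matches with a one-line set-subset test set(str(number)) <= set('012345').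
import Mathlib
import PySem

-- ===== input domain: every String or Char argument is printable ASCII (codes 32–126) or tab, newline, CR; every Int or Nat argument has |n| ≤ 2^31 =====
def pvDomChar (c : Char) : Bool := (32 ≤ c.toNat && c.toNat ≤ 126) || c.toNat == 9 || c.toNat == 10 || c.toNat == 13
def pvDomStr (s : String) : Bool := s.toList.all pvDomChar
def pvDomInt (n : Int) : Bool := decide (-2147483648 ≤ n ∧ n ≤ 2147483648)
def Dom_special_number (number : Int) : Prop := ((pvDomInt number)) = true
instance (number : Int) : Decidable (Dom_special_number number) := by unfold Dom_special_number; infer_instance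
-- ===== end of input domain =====

-- B replaces A's nested per-index counting loops with a single set-subset test; objective: idiomatic.

-- ===== PORT A =====
def special_number (number : Int) : String :=
  let x : String := "012345"
  let num : String := PySem.Int.toStr number
  let count : Int :=
    (PySem.List.pyRange 0 (PySem.Str.len num) 1).foldl (fun count i =>
      (PySem.List.pyRange 0 (PySem.Str.len x) 1).foldl (fun count j =>
        if PySem.List.pyGetD num.toList i ' ' = PySem.List.pyGetD x.toList j ' '
        then count + 1 else count) count) 0
  if count = PySem.Str.len num then "Special!!" else "NOT!!"

-- ===== PORT B =====
def special_number_alt (number : Int) : String :=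
  if PySem.Set.issubset (PySem.Set.ofList (PySem.Int.toStr number).toList)
       (PySem.Set.ofList "012345".toList)
  then "Special!!" else "NOT!!"

-- ===== PRECONDITION & SPEC =====
def Spec_special_number (number : Int) (out : String) : Prop := out = special_number_alt number
instance (number : Int) (out : String) : Decidable (Spec_special_number number out) := by unfold Spec_special_number; infer_instance

-- ===== CLAIM (what is proved, stated in full; the proofs are below) =====
def Claim_equal_special_number : Prop := ∀ (number : Int), Dom_special_number number → Spec_special_number number (special_number number)

-- ===== LEMMAS AND PROOFS =====

theorem pv_digits : "012345".toList = ['0', '1', '2', '3', '4', '5'] := rfl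

-- the inner j-loop adds 1 iff the current character is one of the six (distinct) digits
theorem pv_inner (ch : Char) (c : Int) :
    (PySem.List.pyRange 0 6 1).foldl
      (fun count j => if ch = PySem.List.pyGetD "012345".toList j ' ' then count + 1 else count) c
    = c + (if ("012345".toList).contains ch then 1 else 0) := by
  have h6 : PySem.List.pyRange 0 6 1 = [0, 1, 2, 3, 4, 5] := by decide
  rw [h6]
  simp only [List.foldl, pv_digits, List.contains]
  simp only [PySem.List.pyGetD, PySem.List.pyGet?, PySem.List.pyIdx?]
  norm_num
  split_ifs <;> simp_all

theorem pv_count (l : List Char) :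
    l.foldl (fun c ch => c + (if ("012345".toList).contains ch then 1 else 0)) (0 : Int)
    = (l.countP (fun ch => ("012345".toList).contains ch) : Int) := by
  rw [PySem.List.foldl_congr_mem l _
    (fun acc ch => if ("012345".toList).contains ch then acc + 1 else acc) 0
    (fun acc x _ => by dsimp only; split_ifs <;> omega)]
  rw [PySem.List.foldl_count_if (fun ch => ("012345".toList).contains ch) l 0]
  omega

-- ===== VERDICT (by name: the statement is the Claim_ definition above) =====
theorem special_number_spec : Claim_equal_special_number := by
  intro number _
  unfold Spec_special_number special_number special_number_alt
  set l := (PySem.Int.toStr number).toList with hl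
  have hlen : PySem.Str.len (PySem.Int.toStr number) = PySem.List.len l := by
    simp [PySem.Str.len, PySem.List.len, hl]
  have hx : PySem.Str.len "012345" = 6 := by decide
  simp only [hlen, hx]
  have houter :
      (PySem.List.pyRange 0 (PySem.List.len l) 1).foldl (fun count i =>
        (PySem.List.pyRange 0 6 1).foldl (fun count j =>
          if PySem.List.pyGetD l i ' ' = PySem.List.pyGetD "012345".toList j ' '
          then count + 1 else count) count) (0 : Int)
      = l.foldl (fun c ch => c + (if ("012345".toList).contains ch then 1 else 0)) 0 := by
    have := PySem.List.foldl_pyRange_zero_pyGetD l ' '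
      (fun c ch => c + (if ("012345".toList).contains ch then 1 else 0)) (0 : Int)
    rw [← this]
    exact PySem.List.foldl_congr_mem _ _ _ _
      (fun acc i _ => pv_inner (PySem.List.pyGetD l i ' ') acc)
  rw [houter, pv_count]
  by_cases hsub : ∀ ch ∈ l, ("012345".toList).contains ch = true
  · have hc : l.countP (fun ch => ("012345".toList).contains ch) = l.length :=
      List.countP_eq_length.mpr hsub
    have hT : PySem.Set.issubset (PySem.Set.ofList l) (PySem.Set.ofList "012345".toList) = true := by
      rw [PySem.Set.issubset_iff]
      intro ch hch
      rw [PySem.Set.mem_ofList] at hch ⊢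
      simpa using hsub ch hch
    simp [PySem.List.len]
  · have hc : l.countP (fun ch => ("012345".toList).contains ch) < l.length := by
      rcases Nat.lt_or_ge (l.countP (fun ch => ("012345".toList).contains ch)) l.length with h | h
      · exact h
      · exact absurd (List.countP_eq_length.mp (Nat.le_antisymm List.countP_le_length h)) hsub
    have hF : PySem.Set.issubset (PySem.Set.ofList l) (PySem.Set.ofList "012345".toList) = false := by
      rw [Bool.eq_false_iff]
      intro hT
      rw [PySem.Set.issubset_iff] at hT
      exact hsub (fun ch hch => by
        have := hT ch (by rw [PySem.Set.mem_ofList]; exact hch)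
        rw [PySem.Set.mem_ofList] at this
        simpa using this)
    have hne : (l.countP (fun ch => ("012345".toList).contains ch) : Int) ≠ PySem.List.len l := by
      simp only [PySem.List.len]
      omega
    simp
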